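-- pv_equiv track=rewrite | github.com/errorinmysyntax/simple-jailbreak-keyword-filter | AntiJailBreak.py | squash_single_letters
-- ===== SOURCE A (Python) =====
-- def _merge_single_letter_run(run: list[str]) -> list[str]:
--     if len(run) >= 3:
--         return ["".join(run)]
--     return run
--
-- def squash_single_letters(tokens: list[str]) -> list[str]:
--     """
--     Merge sequences like "i g n o r e" into "ignore" to catch spaced obfuscation.
--     """
--     if not tokens:
--         return []
--
--     out = []
--     run = []
--     for token in tokens:
--         if len(token) == 1:
--             run.append(token)
--             continue
--
--         if run:
--             out.extend(_merge_single_letter_run(run))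
--             run = []
--         out.append(token)
--
--     if run:
--         out.extend(_merge_single_letter_run(run))
--
--     return out
-- ===== SOURCE B (Python) =====
-- def squash_single_letters(tokens: list[str]) -> list[str]:
--     """Span-based: find each maximal run of 1-char tokens with two indices and emit it at once."""
--     out = []
--     i, n = 0, len(tokens)
--     while i < n:
--         if len(tokens[i]) != 1:
--             out.append(tokens[i])
--             i += 1
--         else:
--             j = i
--             while j < n and len(tokens[j]) == 1:
--                 j += 1
--             if j - i >= 3:
--                 out.append("".join(tokens[i:j]))
--             else:
--                 out.extend(tokens[i:j])
--             i = j
--     return out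
-- ===== Notes on version B (the rewrite author's own statement) =====
-- stated objective: alternative
-- what changed: Replaces A's run-accumulator/flush loop (pending 'run' list mutated and flushed at each non-single token and once after the loop) with a two-pointer span scan that locates each maximal run of 1-char tokens by an inner index walk and emits it in one step, with no pending state and no post-loop flush.
import Mathlib
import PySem

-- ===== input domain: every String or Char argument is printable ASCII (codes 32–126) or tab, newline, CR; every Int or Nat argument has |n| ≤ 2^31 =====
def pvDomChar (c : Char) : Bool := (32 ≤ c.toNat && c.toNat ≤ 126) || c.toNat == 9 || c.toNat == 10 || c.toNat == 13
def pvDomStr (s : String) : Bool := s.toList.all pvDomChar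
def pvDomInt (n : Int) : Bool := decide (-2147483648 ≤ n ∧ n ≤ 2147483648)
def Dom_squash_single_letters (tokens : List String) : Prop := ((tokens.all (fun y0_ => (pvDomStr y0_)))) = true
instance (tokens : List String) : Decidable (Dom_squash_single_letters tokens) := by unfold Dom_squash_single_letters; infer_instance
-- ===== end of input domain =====

-- B replaces A's pending-run accumulator/flush loop with a two-pointer span scan that emits each
-- maximal run of 1-char tokens in one step (objective: alternative; same output, same O(n) cost).


-- ===== PORT A =====
-- _merge_single_letter_run
def mergeSingleLetterRun (run : List String) : List String :=
  if run.length ≥ 3 then [PySem.Str.join "" run] else run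

-- the for-loop of A, carrying (out, run); the [] case is the after-loop flush
def squashLoopA (out run : List String) : List String → List String
  | [] => if run ≠ [] then out ++ mergeSingleLetterRun run else out
  | token :: rest =>
    if PySem.Str.len token = 1 then
      squashLoopA out (run ++ [token]) rest
    else
      squashLoopA (out ++ (if run ≠ [] then mergeSingleLetterRun run else []) ++ [token]) [] rest

def squash_single_letters (tokens : List String) : List String :=
  if tokens = [] then [] else squashLoopA [] [] tokens

-- ===== PORT B =====
-- two-pointer span scan: a non-single token is emitted alone; otherwise the maximal span of
-- 1-char tokens (the inner `while j < n` walk = takeWhile/dropWhile) is emitted in one step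
def squash_single_letters_alt : List String → List String
  | [] => []
  | t :: rest =>
    if PySem.Str.len t ≠ 1 then
      t :: squash_single_letters_alt rest
    else
      (if (t :: rest.takeWhile (fun x => PySem.Str.len x == 1)).length ≥ 3 then
        [PySem.Str.join "" (t :: rest.takeWhile (fun x => PySem.Str.len x == 1))]
      else
        t :: rest.takeWhile (fun x => PySem.Str.len x == 1)) ++
      squash_single_letters_alt (rest.dropWhile (fun x => PySem.Str.len x == 1))
termination_by ts => ts.length
decreasing_by
  · simp
  · exact Nat.lt_succ_of_le (List.length_dropWhile_le _ _)

-- ===== PRECONDITION & SPEC =====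
def Spec_squash_single_letters (tokens : List String) (out : List String) : Prop := out = squash_single_letters_alt tokens
instance (tokens : List String) (out : List String) : Decidable (Spec_squash_single_letters tokens out) := by unfold Spec_squash_single_letters; infer_instance

-- ===== CLAIM (what is proved, stated in full; the proofs are below) =====
def Claim_equal_squash_single_letters : Prop := ∀ (tokens : List String), Dom_squash_single_letters tokens → Spec_squash_single_letters tokens (squash_single_letters tokens)

-- ===== LEMMAS AND PROOFS =====

-- A's loop only ever appends to `out`
theorem squashLoopA_out (ts : List String) : ∀ (out run : List String),
    squashLoopA out run ts = out ++ squashLoopA [] run ts := by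
  induction ts with
  | nil =>
    intro out run
    cases run <;> simp [squashLoopA]
  | cons t rest ih =>
    intro out run
    simp only [squashLoopA]
    split_ifs with h h2
    · exact ih out (run ++ [t])
    · rw [ih (out ++ mergeSingleLetterRun run ++ [t]) [],
        ih ([] ++ mergeSingleLetterRun run ++ [t]) []]
      simp
    · rw [ih (out ++ [] ++ [t]) [], ih ([] ++ [] ++ [t]) []]
      simp

-- what A's loop computes, as a function of the pending run and the remaining tokens
def emitPending (run ts : List String) : List String :=
  match run with
  | [] => squash_single_letters_alt ts
  | _ :: _ =>
    mergeSingleLetterRun (run ++ ts.takeWhile (fun x => PySem.Str.len x == 1)) ++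
      squash_single_letters_alt (ts.dropWhile (fun x => PySem.Str.len x == 1))

theorem squashLoopA_emit (ts : List String) : ∀ (run : List String),
    squashLoopA [] run ts = emitPending run ts := by
  induction ts with
  | nil =>
    intro run
    cases run with
    | nil => simp [squashLoopA, emitPending, squash_single_letters_alt]
    | cons r rs =>
      simp [squashLoopA, emitPending]
      rw [squash_single_letters_alt]
  | cons t rest ih =>
    intro run
    by_cases h : PySem.Str.len t = 1
    · have hl : t.length = 1 := by
        have h' := h; simp [PySem.Str.len_eq] at h'; exact h'
      have hb : ((fun x => PySem.Str.len x == 1) t) = true := by simp [hl]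
      have step : squashLoopA [] run (t :: rest) = squashLoopA [] (run ++ [t]) rest := by
        simp only [squashLoopA]
        rw [if_pos h]
      rw [step, ih (run ++ [t])]
      cases run with
      | nil =>
        show emitPending [t] rest = squash_single_letters_alt (t :: rest)
        rw [squash_single_letters_alt]
        rw [if_neg (by simp [hl])]
        simp only [emitPending, mergeSingleLetterRun, List.singleton_append]
      | cons r rs =>
        simp only [emitPending, List.takeWhile_cons, List.dropWhile_cons, hb, if_true]
        simp [List.append_assoc]
    · have hl : ¬ t.length = 1 := by
        have h' := h; simp [PySem.Str.len_eq] at h'; exact h'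
      have hb : ((fun x => PySem.Str.len x == 1) t) = false := by simp [hl]
      have step : squashLoopA [] run (t :: rest) =
          squashLoopA ((if run ≠ [] then mergeSingleLetterRun run else []) ++ [t]) [] rest := by
        simp only [squashLoopA]
        rw [if_neg h]
        simp
      have altstep : squash_single_letters_alt (t :: rest) = t :: squash_single_letters_alt rest := by
        rw [squash_single_letters_alt]
        rw [if_pos h]
      rw [step, squashLoopA_out, ih []]
      have hemit : emitPending [] rest = squash_single_letters_alt rest := rfl
      rw [hemit]
      cases run with
      | nil =>
        show [t] ++ squash_single_letters_alt rest = emitPending [] (t :: rest)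
        show [t] ++ squash_single_letters_alt rest = squash_single_letters_alt (t :: rest)
        rw [altstep]; rfl
      | cons r rs =>
        simp only [emitPending, List.takeWhile_cons, List.dropWhile_cons, hb]
        simp [altstep]

-- ===== VERDICT (by name: the statement is the Claim_ definition above) =====
theorem squash_single_letters_spec : Claim_equal_squash_single_letters := by
  intro tokens _
  unfold Spec_squash_single_letters squash_single_letters
  by_cases h : tokens = []
  · subst h
    simp [squash_single_letters_alt]
  · rw [if_neg h, squashLoopA_emit tokens []]
    rfl
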